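-- pv_equiv track=rewrite | github.com/MosheDvora/YamCourse | Week3/casefet2.py | check_accuracy
-- ===== SOURCE A (Python) =====
-- def check_accuracy(code):
--     counter = 0
--     num_of_accuracy = 0
--     checked_number = []
--     while counter < 4:
--         if code[counter] not in checked_number:
--             if code[counter] in "4812":
--                 num_of_accuracy += 1
--                 checked_number.append(code[counter])
--         counter += 1
--     return  num_of_accuracy
-- ===== SOURCE B (Python) =====
-- def check_accuracy(code):
--     first_four = [code[i] for i in range(4)]
--     return sum(1 for d in "4812" if d in first_four)
-- ===== Notes on version B (the rewrite author's own statement) =====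
-- stated objective: simpler
-- what changed: Inverts the traversal: instead of scanning the first four characters while maintaining a checked_number list for dedup, B iterates over the four distinct target digits '4812' and counts which occur in the explicitly-indexed first-four list, so no dedup state is needed.
import Mathlib
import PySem

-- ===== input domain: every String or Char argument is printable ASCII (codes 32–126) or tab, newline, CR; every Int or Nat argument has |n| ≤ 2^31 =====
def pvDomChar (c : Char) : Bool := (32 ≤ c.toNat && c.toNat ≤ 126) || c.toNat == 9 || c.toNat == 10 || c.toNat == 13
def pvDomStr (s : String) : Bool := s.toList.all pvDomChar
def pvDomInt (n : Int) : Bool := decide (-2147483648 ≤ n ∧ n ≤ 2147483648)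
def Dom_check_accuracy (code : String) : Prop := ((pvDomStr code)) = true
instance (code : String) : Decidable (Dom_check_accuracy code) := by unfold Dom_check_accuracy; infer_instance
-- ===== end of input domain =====

-- B inverts the traversal: it counts which of the four distinct target digits "4812" occur among the
-- explicitly indexed first four characters, eliminating A's while-loop and checked_number dedup list
-- (objective: simpler).


-- ===== PORT A =====
-- while counter < 4 ported as a fold over range(0,4); code[counter] is exact via
-- PySem.Str.pyGet? (`.getD ' '` is dead under Pre_, which excludes the IndexError inputs);
-- `code[counter] in "4812"` for a single character is character membership.
def check_accuracy (code : String) : Int :=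
  (((PySem.List.pyRange 0 4 1).foldl
      (fun (st : Int × List Char) counter =>
        let c := (PySem.Str.pyGet? code counter).getD ' '
        if st.2.contains c then st
        else if ("4812".toList.contains c) then (st.1 + 1, st.2 ++ [c]) else st)
      (0, [])).1)

-- ===== PORT B =====
-- first_four = [code[i] for i in range(4)]; sum(1 for d in "4812" if d in first_four).
def check_accuracy_alt (code : String) : Int :=
  let first_four := (PySem.List.pyRange 0 4 1).map
    (fun i => (PySem.Str.pyGet? code i).getD ' ')
  "4812".toList.foldl (fun acc d => if first_four.contains d then acc + 1 else acc) (0 : Int)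

-- ===== PRECONDITION & SPEC =====
-- Pre_ excludes strings of fewer than 4 characters, on which both Pythons raise IndexError.
def Pre_check_accuracy (code : String) : Prop := 4 ≤ code.toList.length
instance (code : String) : Decidable (Pre_check_accuracy code) := by unfold Pre_check_accuracy; infer_instance
def pvWitness_check_accuracy : String := "4812ab"
def Spec_check_accuracy (code : String) (out : Int) : Prop := out = check_accuracy_alt code
instance (code : String) (out : Int) : Decidable (Spec_check_accuracy code out) := by unfold Spec_check_accuracy; infer_instance

-- ===== CLAIM (what is proved, stated in full; the proofs are below) =====
def Claim_equal_check_accuracy : Prop := ∀ (code : String), Dom_check_accuracy code → Pre_check_accuracy code → Spec_check_accuracy code (check_accuracy code)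

-- ===== LEMMAS AND PROOFS =====

-- A's loop body, abstracted over the current character.
def pvStepA (st : Int × List Char) (c : Char) : Int × List Char :=
  if st.2.contains c then st
  else if ("4812".toList.contains c) then (st.1 + 1, st.2 ++ [c]) else st

-- A's checked_number evolves exactly like `add`-ing the characters that lie in "4812".
def pvStepS (s : List Char) (c : Char) : List Char :=
  if ("4812".toList.contains c) then PySem.Set.add s c else s

lemma pvStepA_eq (st : Int × List Char) (c : Char)
    (h : st.1 = (st.2.length : Int)) :
    pvStepA st c = (((pvStepS st.2 c).length : Int), pvStepS st.2 c) := by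
  unfold pvStepA pvStepS
  by_cases hm : c ∈ st.2
  · simp [hm, Prod.ext_iff, h]
  · by_cases ht : c ∈ "4812".toList
    · have ht' : c = '4' ∨ c = '8' ∨ c = '1' ∨ c = '2' := by simpa using ht
      simp [hm, ht', h]
    · have ht' : ¬(c = '4' ∨ c = '8' ∨ c = '1' ∨ c = '2') := by simpa using ht
      simp [hm, ht', Prod.ext_iff, h]

lemma pvFoldA_eq (cs : List Char) : ∀ (st : Int × List Char),
    st.1 = (st.2.length : Int) →
    cs.foldl pvStepA st = (((cs.foldl pvStepS st.2).length : Int), cs.foldl pvStepS st.2) := by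
  induction cs with
  | nil => intro st h; simp [Prod.ext_iff, h]
  | cons c cs ih =>
    intro st h
    rw [List.foldl_cons, pvStepA_eq st c h, List.foldl_cons]
    exact ih _ (by simp)

-- folding pvStepS is folding Set.add over the filtered list
lemma pvFoldS_eq (cs : List Char) : ∀ (s : List Char),
    cs.foldl pvStepS s = (cs.filter (fun c => "4812".toList.contains c)).foldl PySem.Set.add s := by
  induction cs with
  | nil => intro s; simp
  | cons c cs ih =>
    intro s
    rw [List.foldl_cons, List.filter_cons]
    by_cases ht : ("4812".toList.contains c) = true
    · simp only [ht, if_pos, pvStepS, List.foldl_cons, ih]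
    · simp only [pvStepS, ht, Bool.false_eq_true, not_false_iff, if_neg, ih]

lemma pvFoldS_ofList (cs : List Char) :
    cs.foldl pvStepS [] = PySem.Set.ofList (cs.filter (fun c => "4812".toList.contains c)) := by
  rw [pvFoldS_eq, PySem.Set.ofList_eq_foldl]

-- B's counting fold is a countP.
lemma pvFoldB_countP (first : List Char) (ds : List Char) : ∀ (acc : Int),
    ds.foldl (fun acc d => if first.contains d then acc + 1 else acc) acc
      = acc + ((ds.countP (fun d => first.contains d) : Nat) : Int) := by
  induction ds with
  | nil => intro acc; simp
  | cons d ds ih =>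
    intro acc
    rw [List.foldl_cons, ih, List.countP_cons]
    by_cases h : (first.contains d) = true
    · simp only [h, if_pos]; push_cast; ring
    · have h' : d ∉ first := by simpa using h
      simp [h']

theorem check_accuracy_eq_alt (code : String) : check_accuracy code = check_accuracy_alt code := by
  unfold check_accuracy check_accuracy_alt
  set cs := (PySem.List.pyRange 0 4 1).map (fun i => (PySem.Str.pyGet? code i).getD ' ') with hcs
  have hfold : (PySem.List.pyRange 0 4 1).foldl
      (fun (st : Int × List Char) counter =>
        let c := (PySem.Str.pyGet? code counter).getD ' '
        if st.2.contains c then st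
        else if ("4812".toList.contains c) then (st.1 + 1, st.2 ++ [c]) else st)
      (0, []) = cs.foldl pvStepA (0, []) := by
    rw [hcs, List.foldl_map]; rfl
  rw [hfold, pvFoldA_eq cs (0, []) (by simp), pvFoldS_ofList, pvFoldB_countP cs "4812".toList 0]
  -- |distinct chars of cs lying in "4812"| = |digits of "4812" occurring in cs| (both count the
  -- same finite set: "4812" has no duplicate characters).
  have h1 : (PySem.Set.ofList (cs.filter (fun c => "4812".toList.contains c))).Nodup :=
    PySem.Set.nodup_ofList _
  have h2 : ("4812".toList.filter (fun d => cs.contains d)).Nodup :=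
    List.Nodup.filter _ (by decide)
  have hperm : (PySem.Set.ofList (cs.filter (fun c => "4812".toList.contains c))).Perm
      ("4812".toList.filter (fun d => cs.contains d)) := by
    rw [List.perm_ext_iff_of_nodup h1 h2]
    intro a
    simp [PySem.Set.mem_ofList, List.mem_filter, and_comm]
  rw [List.countP_eq_length_filter, hperm.length_eq]
  simp

-- ===== VERDICT (by name: the statement is the Claim_ definition above) =====
theorem check_accuracy_spec : Claim_equal_check_accuracy := by
  intro code _ _
  exact check_accuracy_eq_alt code
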